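-- pv_equiv track=rewrite | github.com/ManuelLoaizaV/ine018-unmsm | tareas/2/24190316/cadenas_buenas_semana17.py | convertirBuena
-- ===== SOURCE A (Python) =====
-- def convertirBuena(frase):
--     nueva_frase = frase
--     for tamaño in range(len(frase)-1):
--         letra = frase[tamaño]
--         letra_siguiente = frase[tamaño+1]
--         if letra.islower() and letra_siguiente.isupper():
--             nueva_frase = nueva_frase.replace(letra, '', 1)
--             nueva_frase = nueva_frase.replace(letra_siguiente, '', 1)
--
--     return nueva_frase
-- ===== SOURCE B (Python) =====
-- def convertirBuena(frase):
--     # Count how many copies of each character must be deleted.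
--     need = {}
--     for a, b in zip(frase, frase[1:]):
--         if a.islower() and b.isupper():
--             need[a] = need.get(a, 0) + 1
--             need[b] = need.get(b, 0) + 1
--     # Single pass: skip the first need[c] occurrences of each character c.
--     res = []
--     for ch in frase:
--         if need.get(ch, 0) > 0:
--             need[ch] = need[ch] - 1
--         else:
--             res.append(ch)
--     return ''.join(res)
-- ===== Notes on version B (the rewrite author's own statement) =====
-- stated objective: alternative
-- what changed: Replaces A's sequential mutating one-occurrence replace calls by a dict counting how many copies of each character must be deleted, followed by a single pass over the string that skips the first need-count occurrences of each character.
import Mathlib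
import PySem

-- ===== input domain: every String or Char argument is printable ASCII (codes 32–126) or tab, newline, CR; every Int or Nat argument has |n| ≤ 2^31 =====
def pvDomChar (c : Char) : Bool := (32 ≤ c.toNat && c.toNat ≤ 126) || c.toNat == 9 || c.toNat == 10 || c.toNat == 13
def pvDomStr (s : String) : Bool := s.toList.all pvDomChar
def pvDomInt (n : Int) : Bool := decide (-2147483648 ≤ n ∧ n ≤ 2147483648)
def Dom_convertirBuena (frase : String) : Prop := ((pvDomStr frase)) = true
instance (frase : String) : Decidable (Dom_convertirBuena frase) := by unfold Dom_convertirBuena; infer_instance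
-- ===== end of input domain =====

-- B replaces A's sequential mutating replace(…, 1) calls by a character-count table plus one
-- skip pass over the string; a different algorithm with the same return value.


-- ===== PORT A =====
-- Python one-occurrence replace of a single character c by the empty string removes the first occurrence of c
-- (unchanged if c is absent) — exactly List.erase on the char list.
def convertirBuena (frase : String) : String :=
  let cs := frase.toList
  let nueva :=
    (PySem.List.pyRange 0 ((cs.length : Int) - 1) 1).foldl
      (fun acc t =>
        let letra := PySem.List.pyGetD cs t ' '
        let letra_siguiente := PySem.List.pyGetD cs (t + 1) ' '
        if PySem.Chars.islower letra && PySem.Chars.isupper letra_siguiente then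
          (acc.erase letra).erase letra_siguiente
        else acc)
      cs
  String.ofList nueva

-- ===== PORT B =====
-- phase 1: loop over zip(frase, frase[1:]) counting, per character, how many copies
-- must be deleted (dict with get(ch, 0) + 1); phase 2: one pass over frase skipping
-- the first need[ch] occurrences of each ch.
def convertirBuena_alt (frase : String) : String :=
  let cs := frase.toList
  let need :=
    (cs.zip cs.tail).foldl
      (fun (d : PySem.Dict Char Int) p =>
        if PySem.Chars.islower p.1 && PySem.Chars.isupper p.2 then
          let d1 := d.insert p.1 (d.getD p.1 0 + 1)
          d1.insert p.2 (d1.getD p.2 0 + 1)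
        else d)
      PySem.Dict.empty
  let res :=
    (cs.foldl
      (fun (st : List Char × PySem.Dict Char Int) ch =>
        if st.2.getD ch 0 > 0 then (st.1, st.2.insert ch (st.2.getD ch 0 - 1))
        else (st.1 ++ [ch], st.2))
      ([], need)).1
  String.ofList res

-- ===== PRECONDITION & SPEC =====
def Spec_convertirBuena (frase : String) (out : String) : Prop := out = convertirBuena_alt frase
instance (frase : String) (out : String) : Decidable (Spec_convertirBuena frase out) := by unfold Spec_convertirBuena; infer_instance

-- ===== CLAIM (what is proved, stated in full; the proofs are below) =====
def Claim_equal_convertirBuena : Prop := ∀ (frase : String), Dom_convertirBuena frase → Spec_convertirBuena frase (convertirBuena frase)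

-- ===== LEMMAS AND PROOFS =====

-- the list of characters A deletes, read off the original string
def pvDels (cs : List Char) : List Char :=
  (cs.zip cs.tail).flatMap
    (fun p => if PySem.Chars.islower p.1 && PySem.Chars.isupper p.2 then [p.1, p.2] else [])

-- reference "skip" pass: drop the first k c occurrences of each character c
def pvSkip (k : Char → Nat) : List Char → List Char
  | [] => []
  | c :: cs =>
      if 0 < k c then pvSkip (fun x => if x = c then k c - 1 else k x) cs
      else c :: pvSkip k cs

-- A's index range, mapped through the two reads, IS the zip of the string with its tail.
theorem pv_map_pyRange_eq_zip (cs : List Char) :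
    (PySem.List.pyRange 0 ((cs.length : Int) - 1) 1).map
      (fun t => (PySem.List.pyGetD cs t ' ', PySem.List.pyGetD cs (t + 1) ' '))
      = cs.zip cs.tail := by
  apply List.ext_getElem
  · simp [PySem.List.length_pyRange_one]
  · intro k hk1 hk2
    have hlen : k + 1 < cs.length := by
      simp [PySem.List.length_pyRange_one] at hk1
      omega
    have hk' : k < cs.length := by omega
    simp [PySem.List.getElem_pyRange_one, List.getElem_zip, List.getElem_tail]
    constructor
    · simp [List.getElem?_eq_getElem hk']
    · have hcast : PySem.List.pyGetD cs ((k : Int) + 1) ' ' = cs.getD (k + 1) ' ' := by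
        exact_mod_cast PySem.List.pyGetD_natCast cs (k + 1) ' '
      rw [hcast]
      simp [List.getD, List.getElem?_eq_getElem hlen]

-- Folding the per-pair conditional double-erase equals folding single erases over pvDels.
theorem pv_zip_fold_eq_flatMap_fold (ps : List (Char × Char)) (init : List Char) :
    ps.foldl
      (fun acc p =>
        if PySem.Chars.islower p.1 && PySem.Chars.isupper p.2 then
          (acc.erase p.1).erase p.2
        else acc) init
      = (ps.flatMap
          (fun p => if PySem.Chars.islower p.1 && PySem.Chars.isupper p.2 then [p.1, p.2] else [])).foldl
          (fun out c => out.erase c) init := by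
  induction ps generalizing init with
  | nil => rfl
  | cons p ps ih =>
    simp only [List.foldl_cons, List.flatMap_cons]
    by_cases h : (PySem.Chars.islower p.1 && PySem.Chars.isupper p.2) = true
    · rw [if_pos h, if_pos h, List.foldl_append]
      exact ih _
    · rw [if_neg h, if_neg h, List.nil_append]
      exact ih _

-- skipping nothing is the identity
theorem pv_skip_zero (k : Char → Nat) (cs : List Char) (h : ∀ c, k c = 0) :
    pvSkip k cs = cs := by
  induction cs generalizing k with
  | nil => rfl
  | cons c cs ih =>
    simp only [pvSkip, h c]
    simp [ih _ h]

-- one extra unit of budget for d = erasing the first occurrence of d first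
theorem pv_skip_erase (k : Char → Nat) (d : Char) (cs : List Char) :
    pvSkip (fun x => if x = d then k x + 1 else k x) cs = pvSkip k (cs.erase d) := by
  induction cs generalizing k with
  | nil => rfl
  | cons c cs ih =>
    by_cases hcd : c = d
    · subst hcd
      rw [List.erase_cons_head]
      simp only [pvSkip, Nat.lt_add_one_iff, Nat.zero_le, if_pos]
      congr 1
      funext x
      by_cases hx : x = c
      · subst hx; simp
      · simp [hx]
    · rw [List.erase_cons_tail (by simp [hcd])]
      simp only [pvSkip, if_neg hcd]
      by_cases hk : 0 < k c
      · rw [if_pos hk, if_pos hk]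
        rw [← ih (fun x => if x = c then k c - 1 else k x)]
        congr 1
        funext x
        by_cases hx : x = c
        · subst hx; simp [hcd]
        · by_cases hxd : x = d
          · subst hxd; simp [hx]
          · simp [hx, hxd]
      · rw [if_neg hk, if_neg hk, ih]

-- sequential first-occurrence erases = one skip pass driven by occurrence counts
theorem pv_foldl_erase_eq_skip (ds : List Char) (cs : List Char) :
    ds.foldl (fun out c => out.erase c) cs = pvSkip (fun c => ds.count c) cs := by
  induction ds generalizing cs with
  | nil =>
    simp only [List.foldl_nil]
    exact (pv_skip_zero _ cs (by simp)).symm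
  | cons d ds ih =>
    simp only [List.foldl_cons]
    rw [ih (cs.erase d), ← pv_skip_erase]
    congr 1
    funext x
    by_cases hx : x = d
    · subst hx; simp
    · have hdx : ¬ d = x := fun e => hx e.symm
      simp [hx, hdx]

-- the counting loop of B computes exactly the occurrence counts of pvDels
theorem pv_build_count (ps : List (Char × Char)) (d : PySem.Dict Char Int) (c : Char) :
    (ps.foldl
      (fun (d : PySem.Dict Char Int) p =>
        if PySem.Chars.islower p.1 && PySem.Chars.isupper p.2 then
          let d1 := d.insert p.1 (d.getD p.1 0 + 1)
          d1.insert p.2 (d1.getD p.2 0 + 1)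
        else d) d).getD c 0
    = d.getD c 0
      + ((ps.flatMap
          (fun p => if PySem.Chars.islower p.1 && PySem.Chars.isupper p.2 then [p.1, p.2] else [])).count c : Int) := by
  induction ps generalizing d with
  | nil => simp
  | cons p ps ih =>
    simp only [List.foldl_cons, List.flatMap_cons, List.count_append]
    rw [ih]
    by_cases h : (PySem.Chars.islower p.1 && PySem.Chars.isupper p.2) = true
    · simp only [if_pos h]
      simp only [PySem.Dict.getD_insert, List.count_cons, List.count_nil]
      split_ifs <;> simp_all <;> omega
    · simp only [if_neg h, List.count_nil]
      push_cast
      ring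

-- B's second loop, given a dict agreeing with k, appends pvSkip k to the accumulator
theorem pv_loop_eq_skip (cs : List Char) (acc : List Char) (d : PySem.Dict Char Int)
    (k : Char → Nat) (hk : ∀ c, d.getD c 0 = (k c : Int)) :
    (cs.foldl
      (fun (st : List Char × PySem.Dict Char Int) ch =>
        if st.2.getD ch 0 > 0 then (st.1, st.2.insert ch (st.2.getD ch 0 - 1))
        else (st.1 ++ [ch], st.2))
      (acc, d)).1 = acc ++ pvSkip k cs := by
  induction cs generalizing acc d k with
  | nil => simp [pvSkip]
  | cons c cs ih =>
    simp only [List.foldl_cons, pvSkip]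
    by_cases hc : 0 < k c
    · have hd : d.getD c 0 > 0 := by rw [hk c]; exact_mod_cast hc
      rw [if_pos hd, if_pos hc]
      exact ih acc _ _ (fun x => by
        rw [PySem.Dict.getD_insert]
        by_cases hx : x = c
        · subst hx; simp [hk x]; omega
        · simp [hx, hk x])
    · have hd : ¬ d.getD c 0 > 0 := by rw [hk c]; omega
      rw [if_neg hd, if_neg hc]
      rw [ih (acc ++ [c]) d k hk, List.append_assoc]
      rfl

-- ===== VERDICT (by name: the statement is the Claim_ definition above) =====
theorem convertirBuena_spec : Claim_equal_convertirBuena := by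
  intro frase _
  unfold Spec_convertirBuena convertirBuena convertirBuena_alt
  have hA : (PySem.List.pyRange 0 ((frase.toList.length : Int) - 1) 1).foldl
      (fun acc t =>
        let letra := PySem.List.pyGetD frase.toList t ' '
        let letra_siguiente := PySem.List.pyGetD frase.toList (t + 1) ' '
        if PySem.Chars.islower letra && PySem.Chars.isupper letra_siguiente then
          (acc.erase letra).erase letra_siguiente
        else acc) frase.toList
      = pvSkip (fun c => (pvDels frase.toList).count c) frase.toList := by
    have h1 := congrArg
      (List.foldl
        (fun (acc : List Char) (p : Char × Char) =>
          if PySem.Chars.islower p.1 && PySem.Chars.isupper p.2 then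
            (acc.erase p.1).erase p.2
          else acc) frase.toList)
      (pv_map_pyRange_eq_zip frase.toList)
    rw [List.foldl_map] at h1
    rw [h1, pv_zip_fold_eq_flatMap_fold, pv_foldl_erase_eq_skip]
    rfl
  simp only [hA]
  have hB := pv_loop_eq_skip frase.toList []
    ((frase.toList.zip frase.toList.tail).foldl
      (fun (d : PySem.Dict Char Int) p =>
        if PySem.Chars.islower p.1 && PySem.Chars.isupper p.2 then
          let d1 := d.insert p.1 (d.getD p.1 0 + 1)
          d1.insert p.2 (d1.getD p.2 0 + 1)
        else d) PySem.Dict.empty)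
    (fun c => (pvDels frase.toList).count c)
    (fun c => by
      rw [pv_build_count]
      simp [pvDels])
  simp only [hB, List.nil_append]
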